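-- pv_equiv track=rewrite | github.com/cmvan/good_fmt | examine_abundance_coverages/plot_abundances_util.py | make_graph_abundance_lists
-- ===== SOURCE A (Python) =====
-- import operator
--
-- def make_graph_abundance_lists(family_to_abundance_list, collective_families):
--     meta_abundances = []
--
--     for family in collective_families:
--         abundances_to_graph = []
--         sum_abundances = 0
--         for idx in range(len(family_to_abundance_list)):
--             species_abundance_pair = [(x,y) for x,y in family_to_abundance_list[idx] if x == family]
--             if species_abundance_pair:
--                 abundances_to_graph.append(species_abundance_pair[0][1])
--                 sum_abundances += species_abundance_pair[0][1]
--             else: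
--                 abundances_to_graph.append(0)
--         meta_abundances.append((family, abundances_to_graph, sum_abundances))
--     meta_abundances = sorted(meta_abundances, key=operator.itemgetter(2), reverse=True)
--
--     return meta_abundances
-- ===== SOURCE B (Python) =====
-- import operator
--
-- def _first_dict(sample):
--     d = {}
--     for x, y in sample:
--         d.setdefault(x, y)
--     return d
--
-- def make_graph_abundance_lists(family_to_abundance_list, collective_families):
--     dicts = [_first_dict(sample) for sample in family_to_abundance_list]
--     meta = []
--     for f in collective_families:
--         vec = [d.get(f, 0) for d in dicts]
--         meta.append((f, vec, sum(vec)))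
--     return sorted(meta, key=operator.itemgetter(2), reverse=True)
-- ===== Notes on version B (the rewrite author's own statement) =====
-- stated objective: faster
-- what changed: Instead of re-scanning every sample for every family (nested filter per (family, sample) pair), B builds one first-occurrence dict per sample in a single pass and then answers each family by O(1) lookups, computing the total as the sum of the vector.
import Mathlib
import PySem

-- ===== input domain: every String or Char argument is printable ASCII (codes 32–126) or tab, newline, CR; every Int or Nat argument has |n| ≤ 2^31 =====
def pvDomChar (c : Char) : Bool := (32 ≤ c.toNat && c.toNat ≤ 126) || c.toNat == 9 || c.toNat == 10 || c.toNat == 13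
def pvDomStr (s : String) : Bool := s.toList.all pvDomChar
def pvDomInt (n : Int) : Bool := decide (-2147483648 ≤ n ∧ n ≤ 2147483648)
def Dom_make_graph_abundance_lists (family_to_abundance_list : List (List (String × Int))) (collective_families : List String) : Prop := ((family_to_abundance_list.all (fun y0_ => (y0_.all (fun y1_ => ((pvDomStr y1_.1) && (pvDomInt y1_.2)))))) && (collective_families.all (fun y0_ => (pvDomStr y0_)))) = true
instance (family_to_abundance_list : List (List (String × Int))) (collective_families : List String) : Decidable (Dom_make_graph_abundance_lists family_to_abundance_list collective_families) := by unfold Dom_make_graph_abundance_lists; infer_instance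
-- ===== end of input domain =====

-- B replaces A's per-(family, sample) rescans with one first-occurrence dict per sample, built once; a timing run reports it faster.

-- ===== PORT A =====
def make_graph_abundance_lists (family_to_abundance_list : List (List (String × Int))) (collective_families : List String) : List (String × List Int × Int) :=
  let meta_abundances : List (String × List Int × Int) :=
    collective_families.foldl (fun meta_l family =>
      let st := (PySem.List.pyRange 0 (family_to_abundance_list.length : Int) 1).foldl
        (fun (st : List Int × Int) idx =>
          -- idx ranges over range(len(family_to_abundance_list)), always in range, so pyGetD is exact here
          match ((PySem.List.pyGetD family_to_abundance_list idx []).filter (fun p => p.1 == family)).map (fun p => (p.1, p.2)) with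
          | sp :: _ => (st.1 ++ [sp.2], st.2 + sp.2)
          | [] => (st.1 ++ [0], st.2)) (([] : List Int), (0 : Int))
      meta_l ++ [(family, st.1, st.2)]) []
  PySem.List.sorted meta_abundances (fun t => t.2.2) true

-- ===== PORT B =====
def mglFirstDict (sample : List (String × Int)) : PySem.Dict String Int :=
  sample.foldl (fun d p => d.setdefault p.1 p.2) PySem.Dict.empty

def make_graph_abundance_lists_alt (family_to_abundance_list : List (List (String × Int))) (collective_families : List String) : List (String × List Int × Int) :=
  let dicts := family_to_abundance_list.map mglFirstDict
  let meta_b := collective_families.map (fun f =>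
    let vec := dicts.map (fun d => d.getD f 0)
    (f, vec, vec.sum))
  PySem.List.sorted meta_b (fun t => t.2.2) true

-- ===== PRECONDITION & SPEC =====
def Spec_make_graph_abundance_lists (family_to_abundance_list : List (List (String × Int))) (collective_families : List String) (out : List (String × List Int × Int)) : Prop := out = make_graph_abundance_lists_alt family_to_abundance_list collective_families
instance (family_to_abundance_list : List (List (String × Int))) (collective_families : List String) (out : List (String × List Int × Int)) : Decidable (Spec_make_graph_abundance_lists family_to_abundance_list collective_families out) := by unfold Spec_make_graph_abundance_lists; infer_instance

-- ===== CLAIM (what is proved, stated in full; the proofs are below) =====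
def Claim_equal_make_graph_abundance_lists : Prop := ∀ (family_to_abundance_list : List (List (String × Int))) (collective_families : List String), Dom_make_graph_abundance_lists family_to_abundance_list collective_families → Spec_make_graph_abundance_lists family_to_abundance_list collective_families (make_graph_abundance_lists family_to_abundance_list collective_families)

-- ===== LEMMAS AND PROOFS =====

-- first-wins dict lookup = first matching pair in the sample
theorem mgl_dict_get? (s : List (String × Int)) (f : String) (d : PySem.Dict String Int) :
    (s.foldl (fun d p => d.setdefault p.1 p.2) d).get? f =
      ((d.get? f).or ((s.find? (fun p => p.1 == f)).map (·.2))) := by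
  induction s generalizing d with
  | nil => simp
  | cons p t ih =>
    simp only [List.foldl_cons, ih, List.find?_cons]
    by_cases h : p.1 = f
    · subst h
      rw [PySem.Dict.get?_setdefault_self d p.1 p.2]
      cases hd : d.get? p.1 <;> simp
    · rw [PySem.Dict.get?_setdefault_of_ne d p.2 (Ne.symm h)]
      have hb : (p.1 == f) = false := by simp [h]
      rw [hb]

theorem mgl_dict_getD (s : List (String × Int)) (f : String) :
    (mglFirstDict s).getD f 0 =
      (match s.find? (fun p => p.1 == f) with | some p => p.2 | none => 0) := by
  rw [PySem.Dict.getD_eq_get?_getD, mglFirstDict, mgl_dict_get?]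
  cases h : s.find? (fun p => p.1 == f) <;> simp

-- head of a filter is find?
theorem mgl_filter_head (s : List (String × Int)) (f : String) :
    (s.filter (fun p => p.1 == f)).head? = s.find? (fun p => p.1 == f) := by
  induction s with
  | nil => rfl
  | cons p t ih =>
    by_cases h : p.1 = f <;> simp [h, ih]

-- A's inner loop over one family computes the vector of first matches and its sum
theorem mgl_inner (fal : List (List (String × Int))) (family : String)
    (acc : List Int) (s0 : Int) :
    fal.foldl (fun (st : List Int × Int) sample =>
        match (sample.filter (fun p => p.1 == family)).map (fun p => (p.1, p.2)) with
        | q :: _ => (st.1 ++ [q.2], st.2 + q.2)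
        | [] => (st.1 ++ [0], st.2)) (acc, s0)
      = (acc ++ fal.map (fun sample => (mglFirstDict sample).getD family 0),
         s0 + (fal.map (fun sample => (mglFirstDict sample).getD family 0)).sum) := by
  induction fal generalizing acc s0 with
  | nil => simp
  | cons sample t ih =>
    have hg : (mglFirstDict sample).getD family 0 =
        (match sample.find? (fun p => p.1 == family) with | some p => p.2 | none => 0) :=
      mgl_dict_getD sample family
    simp only [List.foldl_cons, List.map_cons, List.sum_cons]
    rw [← mgl_filter_head] at hg
    cases hf : (sample.filter (fun p => p.1 == family)).map (fun p => (p.1, p.2)) with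
    | nil =>
      have : sample.filter (fun p => p.1 == family) = [] := by
        cases h : sample.filter (fun p => p.1 == family) <;> simp [h] at hf ⊢
      rw [this] at hg; simp at hg
      rw [ih]
      simp [hg]
    | cons q r =>
      obtain ⟨p0, t0, h0⟩ : ∃ p0 t0, sample.filter (fun p => p.1 == family) = p0 :: t0 := by
        cases h : sample.filter (fun p => p.1 == family) with
        | nil => rw [h] at hf; simp at hf
        | cons a b => exact ⟨a, b, rfl⟩
      rw [h0] at hf hg
      simp at hf hg
      rw [ih]
      simp [hg]
      obtain ⟨hq, -⟩ := hf
      subst hq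
      exact ⟨rfl, by ring⟩

-- foldl appending singletons is map
theorem mgl_foldl_append {α β : Type} (l : List α) (h : α → β) (init : List β) :
    l.foldl (fun m x => m ++ [h x]) init = init ++ l.map h := by
  induction l generalizing init with
  | nil => simp
  | cons x t ih => simp [ih]

-- ===== VERDICT (by name: the statement is the Claim_ definition above) =====
theorem make_graph_abundance_lists_spec : Claim_equal_make_graph_abundance_lists := by
  intro fal cf _
  unfold Spec_make_graph_abundance_lists make_graph_abundance_lists make_graph_abundance_lists_alt
  simp only [List.map_map]
  congr 1
  have hstep : (fun (meta_l : List (String × List Int × Int)) (family : String) =>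
      meta_l ++ [(family,
        ((PySem.List.pyRange 0 (fal.length : Int) 1).foldl
          (fun (st : List Int × Int) idx =>
            match ((PySem.List.pyGetD fal idx []).filter (fun p => p.1 == family)).map (fun p => (p.1, p.2)) with
            | sp :: _ => (st.1 ++ [sp.2], st.2 + sp.2)
            | [] => (st.1 ++ [0], st.2)) (([] : List Int), (0 : Int))).1,
        ((PySem.List.pyRange 0 (fal.length : Int) 1).foldl
          (fun (st : List Int × Int) idx =>
            match ((PySem.List.pyGetD fal idx []).filter (fun p => p.1 == family)).map (fun p => (p.1, p.2)) with
            | sp :: _ => (st.1 ++ [sp.2], st.2 + sp.2)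
            | [] => (st.1 ++ [0], st.2)) (([] : List Int), (0 : Int))).2)])
      = (fun (meta_l : List (String × List Int × Int)) (family : String) =>
          meta_l ++ [(family,
            fal.map (fun s => (mglFirstDict s).getD family 0),
            (fal.map (fun s => (mglFirstDict s).getD family 0)).sum)]) := by
    funext meta_l family
    rw [PySem.List.foldl_pyRange_zero_pyGetD' fal ([] : List (String × Int))
      (fun (st : List Int × Int) sample =>
        match (sample.filter (fun p => p.1 == family)).map (fun p => (p.1, p.2)) with
        | sp :: _ => (st.1 ++ [sp.2], st.2 + sp.2)
        | [] => (st.1 ++ [0], st.2)) (([] : List Int), (0 : Int)),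
      mgl_inner fal family [] 0]
    simp
  rw [hstep, mgl_foldl_append cf
    (fun family => (family,
      fal.map (fun s => (mglFirstDict s).getD family 0),
      (fal.map (fun s => (mglFirstDict s).getD family 0)).sum)) []]
  simp [Function.comp_def]
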